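-- pv_equiv track=rewrite | github.com/Linutesto/chaos | qjson_agents/logic/universe_orchestrator.py | _orbit_summarize
-- ===== SOURCE A (Python) =====
-- from typing import Dict, List
--
-- def _orbit_summarize(text: str, max_points: int = 3) -> List[str]:
--     # Heuristic, dependency-free summarizer that extracts up to N salient lines.
--     lines = [ln.strip() for ln in (text or "").splitlines() if ln.strip()]
--     scored = []
--     for ln in lines:
--         score = len(ln)
--         if ":" in ln or " - " in ln:
--             score += 20
--         if any(ch.isdigit() for ch in ln):
--             score += 10
--         scored.append((score, ln))
--     scored.sort(reverse=True, key=lambda x: x[0])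
--     return [ln for _, ln in scored[: max(1, int(max_points))]]
-- ===== SOURCE B (Python) =====
-- from typing import List
--
-- def _orbit_summarize(text: str, max_points: int = 3) -> List[str]:
--     # Online bounded-selection: keep at most k best lines in a small ordered buffer,
--     # instead of scoring everything and fully sorting.
--     k = max(1, int(max_points))
--     top = []  # (score, line), ordered by score descending, ties in arrival order
--     for raw in (text or "").splitlines():
--         ln = raw.strip()
--         if not ln:
--             continue
--         score = len(ln)
--         if ":" in ln or " - " in ln:
--             score += 20
--         if any(ch.isdigit() for ch in ln):
--             score += 10
--         i = 0
--         while i < len(top) and top[i][0] >= score: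
--             i += 1
--         top.insert(i, (score, ln))
--         if len(top) > k:
--             top.pop()
--     return [ln for _, ln in top]
-- ===== Notes on version B (the rewrite author's own statement) =====
-- stated objective: alternative
-- what changed: Replaces the score-everything-then-fully-sort-and-slice pipeline with a single online pass that maintains a bounded buffer of the current top-k lines (ordered insert + trim), never materialising or sorting the full scored list.
import Mathlib
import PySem

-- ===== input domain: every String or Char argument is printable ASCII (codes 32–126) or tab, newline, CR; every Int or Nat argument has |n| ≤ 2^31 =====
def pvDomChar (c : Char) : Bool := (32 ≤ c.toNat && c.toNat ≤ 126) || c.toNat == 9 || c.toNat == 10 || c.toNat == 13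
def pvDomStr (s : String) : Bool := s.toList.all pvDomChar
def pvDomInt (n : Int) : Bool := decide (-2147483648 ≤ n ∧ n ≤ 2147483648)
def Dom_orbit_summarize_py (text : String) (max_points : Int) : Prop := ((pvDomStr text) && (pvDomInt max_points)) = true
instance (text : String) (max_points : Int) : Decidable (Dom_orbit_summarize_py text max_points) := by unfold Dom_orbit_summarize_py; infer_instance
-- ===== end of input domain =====

-- B replaces score-all-then-sort-and-slice by one online pass with a bounded top-k buffer (alternative algorithm, same results).

-- ===== PORT A =====

-- score of one (already stripped, non-empty) line: len + 20 if ':' or ' - ' occurs + 10 if any digit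
def pvLineScore (ln : String) : Int :=
  PySem.Str.len ln
  + (if PySem.Str.isIn ":" ln || PySem.Str.isIn " - " ln then 20 else 0)
  + (if ln.toList.any PySem.Chars.isdigit then 10 else 0)

def orbit_summarize_py (text : String) (max_points : Int) : List String :=
  let lines := ((PySem.Str.splitlines text).map PySem.Str.strip).filter (fun l => decide (l ≠ ""))
  let scored := lines.foldl (fun acc ln => acc ++ [(pvLineScore ln, ln)]) ([] : List (Int × String))
  let scored := PySem.List.sorted scored (fun p => p.1) true
  (PySem.List.slice scored none (some (max 1 max_points))).map (fun p => p.2)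

-- ===== PORT B =====

-- the while-loop + list.insert of Source B: place (s, ln) after every buffered entry with score ≥ s
def pvInsertDesc (s : Int) (ln : String) : List (Int × String) → List (Int × String)
  | [] => [(s, ln)]
  | q :: rest => if s ≤ q.1 then q :: pvInsertDesc s ln rest else (s, ln) :: q :: rest

-- one loop iteration of Source B: strip, skip empties, score, ordered insert, trim (top.pop()) past k
def pvStepB (k : Nat) (top : List (Int × String)) (raw : String) : List (Int × String) :=
  let ln := PySem.Str.strip raw
  if ln = "" then top
  else
    let t := pvInsertDesc (pvLineScore ln) ln top
    if k < t.length then t.dropLast else t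

def orbit_summarize_py_alt (text : String) (max_points : Int) : List String :=
  let k := (max 1 max_points).toNat
  ((PySem.Str.splitlines text).foldl (pvStepB k) []).map (fun p => p.2)

-- ===== PRECONDITION & SPEC =====
def Spec_orbit_summarize_py (text : String) (max_points : Int) (out : List String) : Prop := out = orbit_summarize_py_alt text max_points
instance (text : String) (max_points : Int) (out : List String) : Decidable (Spec_orbit_summarize_py text max_points out) := by unfold Spec_orbit_summarize_py; infer_instance

-- ===== CLAIM (what is proved, stated in full; the proofs are below) =====
def Claim_equal_orbit_summarize_py : Prop := ∀ (text : String) (max_points : Int), Dom_orbit_summarize_py text max_points → Spec_orbit_summarize_py text max_points (orbit_summarize_py text max_points)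

-- ===== LEMMAS AND PROOFS =====

-- Source B's hand-written ordered insert is PySem's insertBy with the reverse-sort comparison
theorem pvInsertDesc_eq_insertBy (s : Int) (ln : String) (l : List (Int × String)) :
    pvInsertDesc s ln l
      = PySem.List.insertBy (fun a b => decide (b.1 < a.1)) (s, ln) l := by
  induction l with
  | nil => rfl
  | cons q rest ih =>
      simp only [pvInsertDesc, PySem.List.insertBy, ih]
      by_cases h : s ≤ q.1
      · simp [h, not_lt.mpr h]
      · simp [h, lt_of_not_ge h]

-- the first k entries of an insertion depend only on the first k entries of the buffer
theorem length_insertDesc (s : Int) (ln : String) (l : List (Int × String)) :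
    (pvInsertDesc s ln l).length = l.length + 1 := by
  induction l with
  | nil => rfl
  | cons q rest ih =>
      simp only [pvInsertDesc]
      by_cases h : s ≤ q.1 <;> simp [h, ih]

theorem take_insertDesc (s : Int) (ln : String) (l : List (Int × String)) (k : Nat) (hk : 1 ≤ k) :
    (pvInsertDesc s ln l).take k = (pvInsertDesc s ln (l.take k)).take k := by
  induction l generalizing k with
  | nil => simp [pvInsertDesc]
  | cons q rest ih =>
      obtain ⟨k', rfl⟩ : ∃ k', k = k' + 1 := ⟨k - 1, by omega⟩
      by_cases h : s ≤ q.1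
      · simp only [pvInsertDesc, List.take_succ_cons, h, if_pos]
        rcases Nat.eq_zero_or_pos k' with hk0 | hk1
        · subst hk0; rfl
        · rw [ih k' hk1]
      · simp only [pvInsertDesc, h, ite_false, List.take_succ_cons]
        cases k' with
        | zero => rfl
        | succ m =>
            simp only [List.take_succ_cons, List.take_take]
            rw [Nat.min_eq_left (by omega)]

-- trimming a buffer of length ≤ k after insertion is taking its first k entries
theorem trim_eq_take (s : Int) (ln : String) (l : List (Int × String)) (k : Nat)
    (hl : l.length ≤ k) :
    (if k < (pvInsertDesc s ln l).length then (pvInsertDesc s ln l).dropLast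
     else pvInsertDesc s ln l) = (pvInsertDesc s ln l).take k := by
  have hlen := length_insertDesc s ln l
  by_cases h : k < (pvInsertDesc s ln l).length
  · have : (pvInsertDesc s ln l).length = k + 1 := by omega
    rw [if_pos h, List.dropLast_eq_take, this]
    simp
  · rw [if_neg h, List.take_of_length_le (by omega)]

-- the online trimmed fold computes the first k entries of the untrimmed insertion fold
theorem foldl_trim_eq_take_foldl (k : Nat) (hk : 1 ≤ k) (xs : List (Int × String)) :
    ∀ acc : List (Int × String),
      (xs.foldl (fun t p => pvInsertDesc p.1 p.2 t) acc).take k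
        = xs.foldl (fun t p =>
            let u := pvInsertDesc p.1 p.2 t
            if k < u.length then u.dropLast else u) (acc.take k) := by
  induction xs with
  | nil => intro acc; rfl
  | cons x xs ih =>
      intro acc
      simp only [List.foldl_cons]
      rw [ih (pvInsertDesc x.1 x.2 acc)]
      congr 1
      rw [take_insertDesc x.1 x.2 acc k hk,
          ← trim_eq_take x.1 x.2 (acc.take k) k (by simp)]

-- Source B's loop over raw lines is the trimmed insertion fold over A's scored pairs
theorem foldlB_eq (k : Nat) (raws : List String) :
    ∀ acc : List (Int × String),
      raws.foldl (pvStepB k) acc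
        = ((((raws.map PySem.Str.strip).filter (fun l => decide (l ≠ ""))).map
              (fun ln => (pvLineScore ln, ln))).foldl
            (fun t p =>
              let u := pvInsertDesc p.1 p.2 t
              if k < u.length then u.dropLast else u) acc) := by
  induction raws with
  | nil => intro acc; rfl
  | cons r rs ih =>
      intro acc
      by_cases h : PySem.Str.strip r = ""
      · simp [pvStepB, h, ih]
      · simp [pvStepB, h, ih]

-- ===== VERDICT (by name: the statement is the Claim_ definition above) =====
theorem orbit_summarize_py_spec : Claim_equal_orbit_summarize_py := by
  intro text max_points _
  unfold Spec_orbit_summarize_py orbit_summarize_py orbit_summarize_py_alt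
  simp only []
  have h1 : (1 : Int) ≤ max 1 max_points := le_max_left _ _
  have hk : 1 ≤ (max 1 max_points).toNat := by omega
  rw [PySem.List.slice_to _ (show (0:Int) ≤ max 1 max_points by omega), PySem.List.sorted_rev_eq_foldl_insertBy,
      PySem.List.foldl_append_singleton_eq_map, List.nil_append]
  have hfun : (fun (acc : List (Int × String)) (x : Int × String) =>
        PySem.List.insertBy (fun a b => decide (b.1 < a.1)) x acc)
      = fun t p => pvInsertDesc p.1 p.2 t := by
    funext t p
    rw [pvInsertDesc_eq_insertBy]
  rw [hfun, foldl_trim_eq_take_foldl _ hk, foldlB_eq, List.take_nil]
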